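-- pv_equiv track=rewrite | github.com/kkamaDev/PythonAlgorithms | leftRightDifference.py | LeftRightDiffirence
-- ===== SOURCE A (Python) =====
-- def LeftRightDiffirence(nums:list)->list:
--     left,right  = 0 , sum(nums)
--     result = []
--     for num in nums:
--         left+=num
--
--         if right - left > 0:
--             result.append(1)
--         elif right - left < 0:
--             result.append(-1)
--         else:
--             result.append(0)
--         right-=num
--     return result
-- ===== SOURCE B (Python) =====
-- def LeftRightDiffirence(nums: list) -> list:
--     result = []
--     for i in range(len(nums)):
--         diff = sum(nums[i + 1:]) - sum(nums[:i])
--         result.append(1 if diff > 0 else (-1 if diff < 0 else 0))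
--     return result
-- ===== Notes on version B (the rewrite author's own statement) =====
-- stated objective: simpler
-- what changed: Replaces the single incremental pass maintaining running left/right totals with a per-index recomputation sum(nums[i+1:]) - sum(nums[:i]) and a direct sign
import Mathlib
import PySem

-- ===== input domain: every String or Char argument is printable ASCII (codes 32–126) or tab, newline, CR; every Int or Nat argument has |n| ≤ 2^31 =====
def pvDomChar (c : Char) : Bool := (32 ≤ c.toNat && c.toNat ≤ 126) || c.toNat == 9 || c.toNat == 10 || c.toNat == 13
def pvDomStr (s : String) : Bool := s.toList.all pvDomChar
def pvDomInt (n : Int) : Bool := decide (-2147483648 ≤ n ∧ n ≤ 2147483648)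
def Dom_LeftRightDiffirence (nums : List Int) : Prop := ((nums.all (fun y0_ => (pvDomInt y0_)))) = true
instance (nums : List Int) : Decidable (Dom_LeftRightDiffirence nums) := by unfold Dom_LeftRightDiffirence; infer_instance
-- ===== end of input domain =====

-- B recomputes both side sums by slicing at each index instead of A's single
-- incremental pass with running totals; objective: simpler (not faster).

-- ===== PORT A =====
-- A's loop body: state (left, right, result); left += num, append the sign of right-left, right -= num
def LRD_step (st : Int × Int × List Int) (num : Int) : Int × Int × List Int :=
  let left := st.1 + num
  let right := st.2.1
  let result :=
    if right - left > 0 then st.2.2 ++ [1]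
    else if right - left < 0 then st.2.2 ++ [-1]
    else st.2.2 ++ [0]
  (left, right - num, result)

def LeftRightDiffirence (nums : List Int) : List Int :=
  (nums.foldl LRD_step (0, nums.sum, [])).2.2

-- ===== PORT B =====
def LeftRightDiffirence_alt (nums : List Int) : List Int :=
  (List.range nums.length).map (fun (i : Nat) =>
    let diff := (PySem.List.slice nums (some ((i : Int) + 1)) none).sum
                - (PySem.List.slice nums none (some (i : Int))).sum
    if diff > 0 then 1 else if diff < 0 then -1 else 0)

-- ===== PRECONDITION & SPEC =====
def Spec_LeftRightDiffirence (nums : List Int) (out : List Int) : Prop := out = LeftRightDiffirence_alt nums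
instance (nums : List Int) (out : List Int) : Decidable (Spec_LeftRightDiffirence nums out) := by unfold Spec_LeftRightDiffirence; infer_instance

-- ===== CLAIM (what is proved, stated in full; the proofs are below) =====
def Claim_equal_LeftRightDiffirence : Prop := ∀ (nums : List Int), Dom_LeftRightDiffirence nums → Spec_LeftRightDiffirence nums (LeftRightDiffirence nums)

-- ===== LEMMAS AND PROOFS =====

-- the value A's loop appends at position i, as a function of the start state (L, R)
def LRD_cell (R L : Int) (xs : List Int) (i : Nat) : Int :=
  if R - L - (xs.take i).sum - (xs.take (i + 1)).sum > 0 then 1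
  else if R - L - (xs.take i).sum - (xs.take (i + 1)).sum < 0 then -1 else 0

theorem LRD_loop (xs : List Int) (L R : Int) (acc : List Int) :
    (xs.foldl LRD_step (L, R, acc)).2.2
      = acc ++ (List.range xs.length).map (LRD_cell R L xs) := by
  induction xs generalizing L R acc with
  | nil => simp
  | cons x rest ih =>
    rw [List.foldl_cons]
    show (rest.foldl LRD_step (LRD_step (L, R, acc) x)).2.2 = _
    have hstep : LRD_step (L, R, acc) x
        = (L + x, R - x, acc ++ [LRD_cell R L (x :: rest) 0]) := by
      simp only [LRD_step, LRD_cell, List.take_zero, List.take_succ_cons,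
        List.take_zero, List.sum_nil, List.sum_cons]
      split_ifs with h1 h2 h3 h4 h5 h6 <;> simp_all <;> omega
    rw [hstep, ih]
    have hcell : ∀ i, LRD_cell (R - x) (L + x) rest i = LRD_cell R L (x :: rest) (i + 1) := by
      intro i
      have harith : (R - x) - (L + x) - (rest.take i).sum - (rest.take (i + 1)).sum
          = R - L - ((x :: rest).take (i + 1)).sum - ((x :: rest).take (i + 2)).sum := by
        simp only [List.take_succ_cons, List.sum_cons]; ring
      simp only [LRD_cell, harith]
    simp only [List.length_cons, List.range_succ_eq_map, List.map_cons, List.map_map,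
      List.append_assoc, List.singleton_append]
    exact congrArg (acc ++ ·) (congrArg (LRD_cell R L (x :: rest) 0 :: ·) (List.map_congr_left (fun i _ => hcell i)))

-- B's cell equals A's cell with L = 0, R = nums.sum
theorem LRD_cell_eq (nums : List Int) (i : Nat) :
    (let diff := (PySem.List.slice nums (some ((i : Int) + 1)) none).sum
                 - (PySem.List.slice nums none (some (i : Int))).sum
     if diff > 0 then (1 : Int) else if diff < 0 then -1 else 0)
      = LRD_cell nums.sum 0 nums i := by
  have h1 : PySem.List.slice nums (some ((i : Int) + 1)) none = nums.drop (i + 1) := by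
    have : ((i : Int) + 1) = ((i + 1 : Nat) : Int) := by push_cast; ring
    rw [this, PySem.List.slice_from_natCast]
  have h2 : PySem.List.slice nums none (some (i : Int)) = nums.take i := by
    rw [PySem.List.slice_to_natCast]
  have hsum : (nums.take (i + 1)).sum + (nums.drop (i + 1)).sum = nums.sum := by
    rw [← List.sum_append, List.take_append_drop]
  simp only [h1, h2, LRD_cell]
  have harith : (nums.drop (i + 1)).sum - (nums.take i).sum
      = nums.sum - 0 - (nums.take i).sum - (nums.take (i + 1)).sum := by omega
  rw [harith]

-- ===== VERDICT (by name: the statement is the Claim_ definition above) =====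
theorem LeftRightDiffirence_spec : Claim_equal_LeftRightDiffirence := by
  intro nums _
  show LeftRightDiffirence nums = LeftRightDiffirence_alt nums
  rw [LeftRightDiffirence, LRD_loop, List.nil_append, LeftRightDiffirence_alt]
  apply List.map_congr_left
  intro i _
  exact (LRD_cell_eq nums i).symm
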